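-- pv_equiv track=rewrite | github.com/EEB113A/-hw3-Code-Review | 1070423_鄭元富.py | sort_by_occurrence
-- ===== SOURCE A (Python) =====
-- def sort_by_occurrence(nums):
--     output_nums = []
--     for i in nums:
--         if i not in output_nums:
--             output_nums.append(i)
--             for j in output_nums:
--                 if nums.count(i) < nums.count(j):
--                     output_nums.remove(i)
--                     output_nums.insert(output_nums.index(j), i)
--                     break
--     return output_nums
-- ===== SOURCE B (Python) =====
-- def sort_by_occurrence(nums):
--     counts = {}
--     for x in nums:
--         counts[x] = counts.get(x, 0) + 1
--     buckets = {}
--     for x in counts:          # dict keys = unique values in first-appearance order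
--         buckets.setdefault(counts[x], []).append(x)
--     result = []
--     for c in sorted(buckets):
--         result.extend(buckets[c])
--     return result
-- ===== Notes on version B (the rewrite author's own statement) =====
-- stated objective: faster
-- what changed: Replaced the quadratic membership test plus repeated nums.count insertion-sort with a single counting-dict pass followed by bucketing unique values by count and concatenating the buckets in ascending count order.
import Mathlib
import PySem

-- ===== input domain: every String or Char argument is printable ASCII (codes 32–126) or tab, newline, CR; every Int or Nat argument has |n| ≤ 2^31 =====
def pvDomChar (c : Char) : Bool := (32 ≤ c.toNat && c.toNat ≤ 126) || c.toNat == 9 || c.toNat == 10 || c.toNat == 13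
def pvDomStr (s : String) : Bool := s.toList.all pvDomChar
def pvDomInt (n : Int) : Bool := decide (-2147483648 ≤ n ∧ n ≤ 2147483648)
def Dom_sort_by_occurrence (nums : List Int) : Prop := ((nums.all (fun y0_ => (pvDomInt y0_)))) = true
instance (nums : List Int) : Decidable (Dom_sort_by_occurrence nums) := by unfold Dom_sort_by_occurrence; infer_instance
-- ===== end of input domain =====

-- B replaces A's quadratic membership scan + repeated nums.count insertion sort by one counting pass
-- plus count-buckets concatenated in ascending count order (objective: faster).

-- ===== PORT A =====
-- inner 'for j in output_nums: if nums.count(i) < nums.count(j): … break' — finds the break element j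
def pvFindBreak (nums : List Int) (i : Int) : List Int → Option Int
  | [] => none
  | j :: rest =>
    if PySem.List.count nums i < PySem.List.count nums j then some j
    else pvFindBreak nums i rest

-- one iteration of A's outer loop (the 'none' fallbacks of remove?/index? are unreachable: i was just appended)
def pvAStep (nums : List Int) (acc : List Int) (i : Int) : List Int :=
  if acc.contains i then acc
  else
    let out := acc ++ [i]
    match pvFindBreak nums i out with
    | none => out
    | some j =>
      match PySem.List.remove? out i with
      | none => out
      | some out' =>
        match PySem.List.index? out' j with
        | none => out'
        | some k => PySem.List.insert out' (k : Int) i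

def sort_by_occurrence (nums : List Int) : List Int :=
  nums.foldl (pvAStep nums) []

-- ===== PORT B =====
def sort_by_occurrence_alt (nums : List Int) : List Int :=
  let counts : PySem.Dict Int Int :=
    nums.foldl (fun d x => d.insert x (d.getD x 0 + 1)) ⟨[]⟩
  let buckets : PySem.Dict Int (List Int) :=
    counts.keys.foldl (fun b x => b.modify (counts.getD x 0) [] (· ++ [x])) ⟨[]⟩
  (PySem.List.sorted buckets.keys (fun c => c) false).foldl
    (fun r c => r ++ buckets.getD c []) []

-- ===== PRECONDITION & SPEC =====
def Spec_sort_by_occurrence (nums : List Int) (out : List Int) : Prop := out = sort_by_occurrence_alt nums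
instance (nums : List Int) (out : List Int) : Decidable (Spec_sort_by_occurrence nums out) := by unfold Spec_sort_by_occurrence; infer_instance

-- ===== CLAIM (what is proved, stated in full; the proofs are below) =====
def Claim_equal_sort_by_occurrence : Prop := ∀ (nums : List Int), Dom_sort_by_occurrence nums → Spec_sort_by_occurrence nums (sort_by_occurrence nums)

-- ===== LEMMAS AND PROOFS =====

-- the key both programs sort by: the multiplicity of a value in nums, as an Int
def pvKey (nums : List Int) (x : Int) : Int := (List.count x nums : Int)

-- the comparator of the stable insertion sort by pvKey
def pvBefore (nums : List Int) (a b : Int) : Bool := decide (pvKey nums a < pvKey nums b)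

-- ---------- generic small lemmas ----------

theorem pv_insertBy_perm (before : Int → Int → Bool) (x : Int) (l : List Int) :
    (PySem.List.insertBy before x l).Perm (x :: l) := by
  induction l with
  | nil => simp [PySem.List.insertBy]
  | cons y ys ih =>
    simp only [PySem.List.insertBy]
    split
    · exact List.Perm.refl _
    · exact (List.Perm.cons y ih).trans (List.Perm.swap x y ys)

theorem pv_insert_nat (xs : List Int) (k : Nat) (v : Int) (h : k ≤ xs.length) :
    PySem.List.insert xs (k : Int) v = xs.take k ++ v :: xs.drop k := by
  have h1 : ¬ ((k : Int) < 0) := by omega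
  have h2 : min (k : Int) (xs.length : Int) = (k : Int) := by omega
  simp [PySem.List.insert, PySem.List.sliceIndices, h1, h2]

theorem pv_findBreak_append_self (nums : List Int) (i : Int) (l : List Int) :
    pvFindBreak nums i (l ++ [i]) = pvFindBreak nums i l := by
  induction l with
  | nil => simp [pvFindBreak]
  | cons y ys ih => simp only [List.cons_append, pvFindBreak, ih]

theorem pv_findBreak_eq_none (nums : List Int) (i : Int) (l : List Int) :
    pvFindBreak nums i l = none ↔ ∀ j ∈ l, ¬ (PySem.List.count nums i < PySem.List.count nums j) := by
  induction l with
  | nil => simp [pvFindBreak]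
  | cons y ys ih =>
    simp only [pvFindBreak]
    split
    · simp_all
    · simp_all

theorem pv_findBreak_eq_some (nums : List Int) (i j : Int) (l : List Int)
    (h : pvFindBreak nums i l = some j) :
    ∃ pre suf, l = pre ++ j :: suf ∧
      (∀ y ∈ pre, ¬ (PySem.List.count nums i < PySem.List.count nums y)) ∧
      PySem.List.count nums i < PySem.List.count nums j := by
  induction l with
  | nil => simp [pvFindBreak] at h
  | cons y ys ih =>
    simp only [pvFindBreak] at h
    split at h
    · rename_i hy
      cases h
      exact ⟨[], ys, by simp, by simp, hy⟩
    · rename_i hy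
      obtain ⟨pre, suf, rfl, hpre, hj⟩ := ih h
      refine ⟨y :: pre, suf, by simp, ?_, hj⟩
      intro z hz
      rcases List.mem_cons.mp hz with rfl | hz'
      · exact hy
      · exact hpre z hz'

theorem pv_eraseIdx_append (i : Int) (l : List Int) :
    (l ++ [i]).eraseIdx l.length = l := by
  induction l with
  | nil => rfl
  | cons y ys ih => simpa using ih

theorem pv_remove_append_self (i : Int) (l : List Int) (h : i ∉ l) :
    PySem.List.remove? (l ++ [i]) i = some l := by
  have hidx : PySem.List.index? (l ++ [i]) i = some l.length :=
    PySem.List.index?_append_singleton_self l i h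
  rw [PySem.List.index?_eq_idxOf?] at hidx
  simp [PySem.List.remove?, hidx, pv_eraseIdx_append i l]

theorem pv_insertBy_eq_of_decomp (nums : List Int) (i j : Int) (pre suf : List Int)
    (hpre : ∀ y ∈ pre, pvBefore nums i y = false) (hj : pvBefore nums i j = true) :
    PySem.List.insertBy (pvBefore nums) i (pre ++ j :: suf) = pre ++ i :: j :: suf := by
  induction pre with
  | nil => simp [PySem.List.insertBy, hj]
  | cons y ys ih =>
    have hy : pvBefore nums i y = false := hpre y (by simp)
    simp only [List.cons_append, PySem.List.insertBy, hy]
    simp only [Bool.false_eq_true, if_false, List.cons.injEq, true_and]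
    exact ih (fun z hz => hpre z (by simp [hz]))

-- ---------- A's step is stable insertion by pvKey ----------

theorem pvAStep_eq_insertBy (nums : List Int) (acc : List Int) (i : Int)
    (hni : i ∉ acc) (hnd : acc.Nodup) :
    pvAStep nums acc i = PySem.List.insertBy (pvBefore nums) i acc := by
  have hc : acc.contains i = false := by simpa using hni
  unfold pvAStep
  rw [hc]
  simp only [Bool.false_eq_true, if_false, pv_findBreak_append_self]
  cases hfb : pvFindBreak nums i acc with
  | none =>
    rw [(PySem.List.insertBy_of_forall_not_before (pvBefore nums) i acc
      (fun y hy => by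
        have := (pv_findBreak_eq_none nums i acc).mp hfb y hy
        simp only [pvBefore, pvKey]
        simpa [PySem.List.count, Nat.cast_lt] using this)).symm]
  | some j =>
    obtain ⟨pre, suf, hdec, hpre, hj⟩ := pv_findBreak_eq_some nums i j acc hfb

    have hjpre : j ∉ pre := by
      subst hdec
      rcases List.nodup_append.mp hnd with ⟨_, hnd2, hdisj⟩
      intro hjp
      exact hdisj j hjp j (by simp) rfl
    have hidx : PySem.List.index? acc j = some pre.length := by
      rw [PySem.List.index?_eq_some_iff]
      exact ⟨pre, suf, hdec, rfl, hjpre⟩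
    simp only [pv_remove_append_self i acc hni, hidx]
    have hlen : pre.length ≤ acc.length := by subst hdec; simp
    rw [pv_insert_nat acc pre.length i hlen]
    subst hdec
    rw [List.take_left, List.drop_left]
    rw [pv_insertBy_eq_of_decomp nums i j pre suf
      (fun y hy => by
        simp only [pvBefore, pvKey]
        have := hpre y hy
        simpa [PySem.List.count, Nat.cast_lt] using this)
      (by simp only [pvBefore, pvKey]; simpa [PySem.List.count, Nat.cast_lt] using hj)]

-- ---------- folding A over nums = folding insertBy over the fresh elements ----------

def pvNew (seen : List Int) : List Int → List Int
  | [] => []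
  | x :: t => if x ∈ seen then pvNew seen t else x :: pvNew (seen ++ [x]) t

theorem pvNew_congr (s₁ s₂ l : List Int) (h : ∀ y, y ∈ s₁ ↔ y ∈ s₂) :
    pvNew s₁ l = pvNew s₂ l := by
  induction l generalizing s₁ s₂ with
  | nil => rfl
  | cons x t ih =>
    simp only [pvNew]
    by_cases hx : x ∈ s₁
    · rw [if_pos hx, if_pos ((h x).mp hx), ih _ _ h]
    · rw [if_neg hx, if_neg (fun hc => hx ((h x).mpr hc))]
      congr 1
      exact ih _ _ (fun y => by simp [h y])

theorem pv_foldA (nums : List Int) (l : List Int) (acc : List Int) (hnd : acc.Nodup) :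
    l.foldl (pvAStep nums) acc
      = (pvNew acc l).foldl (fun s x => PySem.List.insertBy (pvBefore nums) x s) acc := by
  induction l generalizing acc with
  | nil => rfl
  | cons x t ih =>
    simp only [List.foldl_cons, pvNew]
    by_cases hx : x ∈ acc
    · rw [if_pos hx]
      have hstep : pvAStep nums acc x = acc := by
        unfold pvAStep
        simp [hx]
      rw [hstep, ih acc hnd]
    · rw [if_neg hx, List.foldl_cons,
        pvAStep_eq_insertBy nums acc x hx hnd]
      have hnd' : (PySem.List.insertBy (pvBefore nums) x acc).Nodup :=
        (pv_insertBy_perm (pvBefore nums) x acc).nodup_iff.mpr (hnd.cons hx)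
      rw [ih _ hnd']
      congr 1
      exact pvNew_congr _ _ t (fun y => by
        rw [PySem.List.mem_insertBy]
        simp [or_comm])

theorem pv_setAdd_eq_pvNew (l seen : List Int) :
    l.foldl PySem.Set.add seen = seen ++ pvNew seen l := by
  induction l generalizing seen with
  | nil => simp [pvNew]
  | cons x t ih =>
    simp only [List.foldl_cons, pvNew, PySem.Set.add]
    by_cases hx : x ∈ seen
    · simp [PySem.Set.contains, hx, ih]
    · simp [PySem.Set.contains, hx, ih (seen ++ [x])]

theorem pv_A_eq_sorted (nums : List Int) :
    sort_by_occurrence nums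
      = PySem.List.sorted (PySem.List.dedup nums) (pvKey nums) false := by
  have h1 : pvNew [] nums = PySem.List.dedup nums := by
    have h := pv_setAdd_eq_pvNew nums []
    rw [PySem.List.dedup_eq_ofList, PySem.Set.ofList]
    simpa [PySem.Set.empty] using h.symm
  rw [sort_by_occurrence, pv_foldA nums nums [] List.nodup_nil, h1,
    PySem.List.sorted_eq_foldl_insertBy]
  rfl

-- ---------- B = sorted (dedup nums) by pvKey ----------

theorem pv_keys_insert {ν : Type} (d : PySem.Dict Int ν) (k : Int) (v : ν) :
    (d.insert k v).keys = PySem.Set.add d.keys k := by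
  have hc : d.contains k = PySem.Set.contains d.keys k := by
    rw [Bool.eq_iff_iff]
    simp [PySem.Dict.contains, PySem.Dict.keys, PySem.Set.contains,
      List.any_eq_true, List.mem_map, beq_iff_eq]
  by_cases h : PySem.Set.contains d.keys k = true
  · rw [PySem.Dict.insert, PySem.Set.add, if_pos h, if_pos (hc.trans h)]
    simp only [PySem.Dict.keys, List.map_map]
    apply List.map_congr_left
    intro p _
    by_cases hp : p.1 = k
    · simp [hp]
    · simp [hp]
  · rw [PySem.Dict.insert, PySem.Set.add, if_neg h,
      if_neg (fun hcon => h (hc.symm.trans hcon))]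
    simp [PySem.Dict.keys]

-- keys of a fold of inserts, as a Set fold
theorem pv_keys_fold_insert (l : List Int) (d : PySem.Dict Int Int)
    (f : PySem.Dict Int Int → Int → Int) :
    (l.foldl (fun d x => d.insert x (f d x)) d).keys = l.foldl PySem.Set.add d.keys := by
  induction l generalizing d with
  | nil => rfl
  | cons x t ih => simp only [List.foldl_cons, ih, pv_keys_insert]

-- the bucket fold: getD and keys
theorem pv_buck_getD (k : Int → Int) (o : List Int) (d : PySem.Dict Int (List Int)) (c : Int) :
    ((o.foldl (fun b x => b.modify (k x) [] (· ++ [x])) d).getD c [])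
      = d.getD c [] ++ o.filter (fun x => k x == c) := by
  induction o generalizing d with
  | nil => simp
  | cons x t ih =>
    simp only [List.foldl_cons, ih, List.filter_cons]
    rw [PySem.Dict.modify, PySem.Dict.getD_insert]
    by_cases hc : c = k x
    · simp [hc]
    · have : ¬ (k x == c) = true := by simpa [beq_iff_eq] using Ne.symm hc
      simp [hc, this]

theorem pv_buck_keys (k : Int → Int) (o : List Int) (d : PySem.Dict Int (List Int)) :
    (o.foldl (fun b x => b.modify (k x) [] (· ++ [x])) d).keys
      = o.foldl (fun s x => PySem.Set.add s (k x)) d.keys := by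
  induction o generalizing d with
  | nil => rfl
  | cons x t ih =>
    rw [List.foldl_cons, ih, List.foldl_cons]
    congr 1
    rw [PySem.Dict.modify, pv_keys_insert]

-- dropWhile's head fails the predicate
theorem pv_dropWhile_head (p : Int → Bool) (l r : List Int) (hh : Int)
    (hd : l.dropWhile p = hh :: r) : p hh = false := by
  induction l with
  | nil => simp at hd
  | cons y ys ih =>
    rw [List.dropWhile_cons] at hd
    split at hd
    · exact ih hd
    · cases hd; simp_all

-- sorted-by-id of a dedup depends only on membership
theorem pv_sorted_id_dedup_congr (A B : List Int) (h : ∀ c, c ∈ A ↔ c ∈ B) :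
    PySem.List.sorted (PySem.List.dedup A) (fun c => c) false
      = PySem.List.sorted (PySem.List.dedup B) (fun c => c) false := by
  apply PySem.List.sorted_eq_of_perm_of_pairwise_lt
  · exact ((PySem.List.sorted_perm (PySem.List.dedup B) (fun c => c) false).trans
      ((List.perm_ext_iff_of_nodup (PySem.List.nodup_dedup B) (PySem.List.nodup_dedup A)).mpr
        (fun c => by rw [PySem.List.mem_dedup, PySem.List.mem_dedup, h])))
  · have hle := PySem.List.sorted_pairwise (PySem.List.dedup B) (fun c => c)
    have hnd : (PySem.List.sorted (PySem.List.dedup B) (fun c => c) false).Nodup :=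
      (PySem.List.sorted_perm (PySem.List.dedup B) (fun c => c) false).nodup_iff.mpr
        (PySem.List.nodup_dedup B)
    exact (List.Pairwise.and hle hnd).imp (fun hab => lt_of_le_of_ne hab.1 hab.2)

-- stability: filtering a sorted list by one key value gives the original filter
theorem pv_filter_insertBy (k : Int → Int) (x c : Int) (l : List Int)
    (h : l.Pairwise (fun a b => k a ≤ k b)) :
    (PySem.List.insertBy (fun a b => decide (k a < k b)) x l).filter (fun y => k y == c)
      = l.filter (fun y => k y == c) ++ if k x == c then [x] else [] := by
  induction l with
  | nil => by_cases hxc : k x = c <;> simp [PySem.List.insertBy, List.filter, hxc]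
  | cons y ys ih =>
    simp only [PySem.List.insertBy]
    split
    · rename_i hlt
      have hlt' : k x < k y := of_decide_eq_true hlt
      by_cases hxc : k x = c
      · have : ys.filter (fun z => k z == c) = [] := by
          rw [List.filter_eq_nil_iff]
          intro z hz
          have : k y ≤ k z := (List.pairwise_cons.mp h).1 z hz
          simp [beq_iff_eq]; omega
        have hyc : ¬ (k y == c) = true := by simp [beq_iff_eq]; omega
        simp [hxc, hyc, this]
      · have : ¬ (k x == c) = true := by simpa [beq_iff_eq] using hxc
        simp [List.filter_cons, this]
    · rw [List.filter_cons, List.filter_cons, ih (List.pairwise_cons.mp h).2]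
      split <;> simp

theorem pv_filter_sorted (k : Int → Int) (l : List Int) (c : Int) :
    (PySem.List.sorted l k false).filter (fun y => k y == c)
      = l.filter (fun y => k y == c) := by
  induction l using List.reverseRecOn with
  | nil => rfl
  | append_singleton l x ih =>
    have hs : PySem.List.sorted (l ++ [x]) k false
        = PySem.List.insertBy (fun a b => decide (k a < k b)) x (PySem.List.sorted l k false) := by
      rw [PySem.List.sorted_eq_foldl_insertBy, PySem.List.sorted_eq_foldl_insertBy,
        List.foldl_append]
      rfl
    rw [hs, pv_filter_insertBy k x c _ (PySem.List.sorted_pairwise l k),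
      ih, List.filter_append]
    congr 1
    by_cases hxc : k x = c
    · simp [List.filter, hxc]
    · rw [show (k x == c) = false from beq_eq_false_iff_ne.mpr hxc]
      simp [List.filter, beq_eq_false_iff_ne.mpr hxc]

-- bucket decomposition of a key-sorted list
theorem pv_blocks (k : Int → Int) : ∀ (n : Nat) (S : List Int), S.length ≤ n →
    S.Pairwise (fun a b => k a ≤ k b) →
    (PySem.List.sorted (PySem.List.dedup (S.map k)) (fun c => c) false).flatMap
      (fun c => S.filter (fun x => k x == c)) = S := by
  intro n
  induction n with
  | zero =>
    intro S hlen _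
    have hS0 : S = [] := List.eq_nil_of_length_eq_zero (Nat.le_zero.mp hlen)
    subst hS0
    rfl
  | succ n ih =>
    intro S hlen hS
    cases S with
    | nil => rfl
    | cons x t =>
      have hpx : (fun y => k y == k x) x = true := by simp
      have hBR : (x :: t).takeWhile (fun y => k y == k x)
          ++ (x :: t).dropWhile (fun y => k y == k x) = x :: t :=
        List.takeWhile_append_dropWhile
      generalize hBdef : (x :: t).takeWhile (fun y => k y == k x) = B at *
      generalize hRdef : (x :: t).dropWhile (fun y => k y == k x) = R at *
      have hxB : x ∈ B := by
        rw [← hBdef]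
        simp
      have hkB : ∀ y ∈ B, k y = k x := by
        intro y hy
        rw [← hBdef] at hy
        simpa using List.mem_takeWhile_imp hy
      have hSBR : List.Pairwise (fun a b => k a ≤ k b) (B ++ R) := by
        rw [hBR]; exact hS
      obtain ⟨hPB, hPR, hcross⟩ := List.pairwise_append.mp hSBR
      have hR : ∀ y ∈ R, k x < k y := by
        cases hR0 : R with
        | nil => simp
        | cons hh r =>
          have hhf : (fun y => k y == k x) hh = false := by
            apply pv_dropWhile_head _ (x :: t) r hh
            rw [hRdef, hR0]
          have hhx : k hh ≠ k x := by simpa using hhf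
          have hxh : k x ≤ k hh := hcross x hxB hh (by rw [hR0]; simp)
          intro y hy
          rcases List.mem_cons.mp hy with rfl | hy'
          · exact lt_of_le_of_ne hxh (Ne.symm hhx)
          · have hPR' : List.Pairwise (fun a b => k a ≤ k b) (hh :: r) := hR0 ▸ hPR
            have h1 : k hh ≤ k y := (List.pairwise_cons.mp hPR').1 y hy'
            exact lt_of_lt_of_le (lt_of_le_of_ne hxh (Ne.symm hhx)) h1
      have hmemR : ∀ y ∈ R, y ∈ x :: t := by
        intro y hy
        rw [← hBR, List.mem_append]
        exact Or.inr hy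
      have hmem : ∀ c, c ∈ (x :: t).map k ↔ (c = k x ∨ c ∈ R.map k) := by
        intro c
        rw [← hBR, List.map_append, List.mem_append]
        constructor
        · rintro (hc | hc)
          · obtain ⟨y, hy, rfl⟩ := List.mem_map.mp hc
            exact Or.inl (hkB y hy)
          · exact Or.inr hc
        · rintro (rfl | hc)
          · exact Or.inl (List.mem_map.mpr ⟨x, hxB, rfl⟩)
          · exact Or.inr hc
      have hinner_mem : ∀ c, c ∈ PySem.List.sorted (PySem.List.dedup (R.map k)) (fun c => c) false
          ↔ c ∈ R.map k := by
        intro c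
        rw [(PySem.List.sorted_perm (PySem.List.dedup (R.map k)) (fun c => c) false).mem_iff,
          PySem.List.mem_dedup]
      have hinner_nodup : (PySem.List.sorted (PySem.List.dedup (R.map k)) (fun c => c) false).Nodup :=
        (PySem.List.sorted_perm (PySem.List.dedup (R.map k)) (fun c => c) false).nodup_iff.mpr
          (PySem.List.nodup_dedup _)
      have hltinner : ∀ c ∈ PySem.List.sorted (PySem.List.dedup (R.map k)) (fun c => c) false,
          k x < c := by
        intro c hc
        obtain ⟨y, hy, rfl⟩ := List.mem_map.mp ((hinner_mem c).mp hc)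
        exact hR y hy
      have hsortdec : PySem.List.sorted (PySem.List.dedup ((x :: t).map k)) (fun c => c) false
          = k x :: PySem.List.sorted (PySem.List.dedup (R.map k)) (fun c => c) false := by
        apply PySem.List.sorted_eq_of_perm_of_pairwise_lt
        · apply (List.perm_ext_iff_of_nodup ?_ (PySem.List.nodup_dedup _)).mpr
          · intro c
            rw [PySem.List.mem_dedup, hmem, List.mem_cons, hinner_mem]
          · exact List.Nodup.cons
              (fun hc => lt_irrefl (k x) (hltinner (k x) hc)) hinner_nodup
        · rw [List.pairwise_cons]
          refine ⟨hltinner, ?_⟩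
          have hle := PySem.List.sorted_pairwise (PySem.List.dedup (R.map k)) (fun c => c)
          exact (List.Pairwise.and hle hinner_nodup).imp
            (fun hab => lt_of_le_of_ne hab.1 hab.2)
      rw [hsortdec, List.flatMap_cons]
      have hfm : (x :: t).filter (fun y => k y == k x) = B := by
        rw [← hBR, List.filter_append]
        have h1 : B.filter (fun y => k y == k x) = B :=
          List.filter_eq_self.mpr (fun y hy => by simp [hkB y hy])
        have h2 : R.filter (fun y => k y == k x) = [] :=
          List.filter_eq_nil_iff.mpr (fun y hy => by
            simp only [beq_iff_eq]
            exact fun hc => lt_irrefl (k x) (hc ▸ hR y hy))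
        rw [h1, h2, List.append_nil]
      have hcong : (PySem.List.sorted (PySem.List.dedup (R.map k)) (fun c => c) false).flatMap
            (fun c => (x :: t).filter (fun y => k y == c))
          = (PySem.List.sorted (PySem.List.dedup (R.map k)) (fun c => c) false).flatMap
            (fun c => R.filter (fun y => k y == c)) := by
        apply List.flatMap_congr
        intro c hc
        rw [← hBR, List.filter_append]
        have hB0 : B.filter (fun y => k y == c) = [] :=
          List.filter_eq_nil_iff.mpr (fun y hy => by
            simp only [beq_iff_eq]
            intro hcon
            exact lt_irrefl (k x) ((hkB y hy ▸ hcon) ▸ hltinner c hc))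
        rw [hB0, List.nil_append]
      have hRlen : R.length ≤ n := by
        have hlenBR := congrArg List.length hBR
        rw [List.length_append] at hlenBR
        have hB1 : 0 < B.length := List.length_pos_of_mem hxB
        simp only [List.length_cons] at hlenBR hlen
        omega
      have hRpair : R.Pairwise (fun a b => k a ≤ k b) := hPR
      rw [hfm, hcong, ih R hRlen hRpair, hBR]

theorem pv_B_eq_sorted (nums : List Int) :
    sort_by_occurrence_alt nums
      = PySem.List.sorted (PySem.List.dedup nums) (pvKey nums) false := by
  simp only [sort_by_occurrence_alt]
  set C : PySem.Dict Int Int := nums.foldl (fun d x => d.insert x (d.getD x 0 + 1)) ⟨[]⟩ with hC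
  have hCget : ∀ x, C.getD x 0 = pvKey nums x := by
    intro x
    have h := PySem.Dict.getD_foldl_insert_add_one nums (⟨[]⟩ : PySem.Dict Int Int) x
    rw [hC]
    rw [h]
    simp [pvKey, PySem.Dict.getD, PySem.Dict.get?]
  have hCkeys : C.keys = PySem.List.dedup nums := by
    rw [hC, pv_keys_fold_insert nums ⟨[]⟩ (fun d x => d.getD x 0 + 1),
      PySem.List.dedup_eq_ofList, PySem.Set.ofList]
    rfl
  rw [hCkeys]
  have hstepeq : (fun (b : PySem.Dict Int (List Int)) (x : Int) => b.modify (C.getD x 0) [] (· ++ [x]))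
      = fun b x => b.modify (pvKey nums x) [] (· ++ [x]) := by
    funext b x
    rw [hCget]
  rw [hstepeq]
  rw [pv_buck_keys (pvKey nums) (PySem.List.dedup nums) ⟨[]⟩]
  have hkeys2 : (PySem.List.dedup nums).foldl (fun s x => PySem.Set.add s (pvKey nums x))
        (PySem.Dict.keys (⟨[]⟩ : PySem.Dict Int (List Int)))
      = PySem.List.dedup ((PySem.List.dedup nums).map (pvKey nums)) := by
    rw [PySem.List.dedup_eq_ofList ((PySem.List.dedup nums).map (pvKey nums)),
      PySem.Set.ofList, List.foldl_map]
    rfl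
  rw [hkeys2]
  rw [PySem.List.foldl_append_eq_flatMap]
  rw [List.nil_append]
  have hg : (fun c => ((PySem.List.dedup nums).foldl
        (fun (b : PySem.Dict Int (List Int)) x => b.modify (pvKey nums x) [] (· ++ [x]))
          ⟨[]⟩).getD c [])
      = fun c => (PySem.List.dedup nums).filter (fun y => pvKey nums y == c) := by
    funext c
    rw [pv_buck_getD]
    rfl
  rw [hg]
  have hSperm := PySem.List.sorted_perm (PySem.List.dedup nums) (pvKey nums) false
  rw [pv_sorted_id_dedup_congr ((PySem.List.dedup nums).map (pvKey nums))
    ((PySem.List.sorted (PySem.List.dedup nums) (pvKey nums) false).map (pvKey nums))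
    (fun c => ((hSperm.map (pvKey nums)).mem_iff).symm)]
  have hfilters : (fun c => (PySem.List.dedup nums).filter (fun y => pvKey nums y == c))
      = fun c => (PySem.List.sorted (PySem.List.dedup nums) (pvKey nums) false).filter
          (fun y => pvKey nums y == c) := by
    funext c
    rw [pv_filter_sorted]
  rw [hfilters]
  exact pv_blocks (pvKey nums)
    (PySem.List.sorted (PySem.List.dedup nums) (pvKey nums) false).length _ le_rfl
    (PySem.List.sorted_pairwise (PySem.List.dedup nums) (pvKey nums))



-- ===== VERDICT (by name: the statement is the Claim_ definition above) =====
theorem sort_by_occurrence_spec : Claim_equal_sort_by_occurrence := by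
  intro nums _
  unfold Spec_sort_by_occurrence
  rw [pv_A_eq_sorted, pv_B_eq_sorted]
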